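-- pv_equiv track=rewrite | github.com/stevenkaras/ready-set-deploy | ready_set_deploy/plugins/base.py | _remove_multiversion
-- ===== SOURCE A (Python) =====
-- def _remove_multiversion(left: dict[str, set[str]], to_remove: dict[str, set[str]]) -> dict[str, set[str]]:
--     result = {}
--     for package, versions in left.items():
--         result[package] = set(versions)
--     for package, versions in to_remove.items():
--         result.setdefault(package, set())
--         result[package] -= versions
--         if not result[package]:
--             result.pop(package, None)
--
--     return result
-- ===== SOURCE B (Python) =====
-- def _remove_multiversion(left: dict[str, set[str]], to_remove: dict[str, set[str]]) -> dict[str, set[str]]: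
--     result = {}
--     for package, versions in left.items():
--         if package in to_remove:
--             remaining = versions - to_remove[package]
--             if remaining:
--                 result[package] = remaining
--         else:
--             result[package] = set(versions)
--     return result
-- ===== Notes on version B (the rewrite author's own statement) =====
-- stated objective: simpler
-- what changed: B is a single pass over left.items() using to_remove as a lookup table (packages only in to_remove, which A adds and immediately pops, are never touched), instead of A's copy-everything-then-iterate-to_remove-and-pop two-loop scheme.
import Mathlib
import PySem

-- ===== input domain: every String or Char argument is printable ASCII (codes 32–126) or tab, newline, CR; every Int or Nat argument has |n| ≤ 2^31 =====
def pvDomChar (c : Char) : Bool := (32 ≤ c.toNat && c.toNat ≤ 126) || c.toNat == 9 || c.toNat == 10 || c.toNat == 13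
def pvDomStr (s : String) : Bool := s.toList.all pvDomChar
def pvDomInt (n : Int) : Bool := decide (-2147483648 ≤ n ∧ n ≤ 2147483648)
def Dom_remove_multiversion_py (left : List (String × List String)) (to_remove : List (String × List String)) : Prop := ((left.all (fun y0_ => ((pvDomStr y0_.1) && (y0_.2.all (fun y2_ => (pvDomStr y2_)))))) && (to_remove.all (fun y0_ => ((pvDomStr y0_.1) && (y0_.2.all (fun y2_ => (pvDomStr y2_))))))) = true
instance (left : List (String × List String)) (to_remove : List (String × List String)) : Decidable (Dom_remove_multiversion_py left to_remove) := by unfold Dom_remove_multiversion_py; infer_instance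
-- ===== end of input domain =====

-- B replaces A's copy-then-subtract-and-pop two-loop scheme by a single pass over left
-- using to_remove as a lookup table (objective: simpler).


-- ===== PORT A =====
def remove_multiversion_py (left : List (String × List String)) (to_remove : List (String × List String)) : List (String × List String) :=
  -- result = {}; for package, versions in left.items(): result[package] = set(versions)
  let result : PySem.Dict String (List String) :=
    left.foldl (fun d pv => d.insert pv.1 (PySem.Set.ofList pv.2)) PySem.Dict.empty
  -- for package, versions in to_remove.items(): setdefault; -=; pop if empty
  let result :=
    to_remove.foldl (fun d pv =>
      let d := d.setdefault pv.1 PySem.Set.empty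
      let v := PySem.Set.diff (d.getD pv.1 PySem.Set.empty) pv.2
      let d := d.insert pv.1 v
      if v.isEmpty then d.erase pv.1 else d) result
  result.items

-- ===== PORT B =====
def remove_multiversion_py_alt (left : List (String × List String)) (to_remove : List (String × List String)) : List (String × List String) :=
  left.filterMap (fun pv =>
    match (PySem.Dict.mk to_remove).get? pv.1 with
    | none => some (pv.1, PySem.Set.ofList pv.2)
    | some rs =>
      let remaining := PySem.Set.diff pv.2 rs
      if remaining.isEmpty then none else some (pv.1, remaining))

-- ===== PRECONDITION & SPEC =====
-- Pre_ states the encoding invariants of the Python argument types themselves: the two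
-- association lists encode dicts (keys distinct) and each left value encodes a set
-- (elements distinct); every input the Python function can receive satisfies them.
def Pre_remove_multiversion_py (left : List (String × List String)) (to_remove : List (String × List String)) : Prop :=
  (left.map Prod.fst).Nodup ∧ (to_remove.map Prod.fst).Nodup ∧ ∀ pv ∈ left, pv.2.Nodup
instance (left : List (String × List String)) (to_remove : List (String × List String)) : Decidable (Pre_remove_multiversion_py left to_remove) := by unfold Pre_remove_multiversion_py; infer_instance
def pvWitness_remove_multiversion_py : (List (String × List String)) × (List (String × List String)) :=
  ([("a", ["1", "2"]), ("b", ["3"])], [("a", ["1"]), ("c", ["9"])])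

def Spec_remove_multiversion_py (left : List (String × List String)) (to_remove : List (String × List String)) (out : List (String × List String)) : Prop := out = remove_multiversion_py_alt left to_remove
instance (left : List (String × List String)) (to_remove : List (String × List String)) (out : List (String × List String)) : Decidable (Spec_remove_multiversion_py left to_remove out) := by unfold Spec_remove_multiversion_py; infer_instance

-- ===== CLAIM (what is proved, stated in full; the proofs are below) =====
def Claim_equal_remove_multiversion_py : Prop := ∀ (left : List (String × List String)) (to_remove : List (String × List String)), Dom_remove_multiversion_py left to_remove → Pre_remove_multiversion_py left to_remove → Spec_remove_multiversion_py left to_remove (remove_multiversion_py left to_remove)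

-- ===== LEMMAS AND PROOFS =====

theorem pv_foldl_add_eq_append {α : Type} [BEq α] [LawfulBEq α] (l acc : List α)
    (hacc : ∀ x ∈ l, x ∉ acc) (h : l.Nodup) : l.foldl PySem.Set.add acc = acc ++ l := by
  induction l generalizing acc with
  | nil => simp
  | cons x xs ih =>
    have hx : PySem.Set.add acc x = acc ++ [x] := by
      simp only [PySem.Set.add, PySem.Set.contains]
      rw [if_neg]
      have : x ∉ acc := hacc x (by simp)
      simpa [List.contains_iff_mem] using this
    simp only [List.foldl_cons, hx]
    rw [ih (acc ++ [x])]
    · simp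
    · intro z hz
      simp only [List.mem_append, List.mem_singleton]
      rintro (hz1 | rfl)
      · exact hacc z (by simp [hz]) hz1
      · exact (List.nodup_cons.mp h).1 hz
    · exact (List.nodup_cons.mp h).2

theorem pv_ofList_eq_self {α : Type} [BEq α] [LawfulBEq α] (l : List α) (h : l.Nodup) :
    PySem.Set.ofList l = l := by
  have := pv_foldl_add_eq_append l [] (by simp) h
  simpa [PySem.Set.ofList, PySem.Set.empty] using this

-- the body of B's filterMap, as a function of the stored pair
def pvStepB (tr : List (String × List String)) (qv : String × List String) : Option (String × List String) :=
  match (PySem.Dict.mk tr).get? qv.1 with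
  | none => some qv
  | some rs =>
    let remaining := PySem.Set.diff qv.2 rs
    if remaining.isEmpty then none else some (qv.1, remaining)

-- one iteration of A's second loop
def pvStepA (d : PySem.Dict String (List String)) (pv : String × List String) : PySem.Dict String (List String) :=
  let d := d.setdefault pv.1 PySem.Set.empty
  let v := PySem.Set.diff (d.getD pv.1 PySem.Set.empty) pv.2
  let d := d.insert pv.1 v
  if v.isEmpty then d.erase pv.1 else d

theorem pv_stepA_items (d : PySem.Dict String (List String)) (hd : d.keys.Nodup)
    (p : String) (vs : List String) :
    (pvStepA d (p, vs)).items = d.items.filterMap (fun qv =>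
      if qv.1 = p then
        (if (PySem.Set.diff qv.2 vs).isEmpty then none else some (p, PySem.Set.diff qv.2 vs))
      else some qv) := by
  by_cases hc : d.contains p = true
  · -- package already in result: overwrite in place, pop if emptied
    have hset : d.setdefault p PySem.Set.empty = d := PySem.Dict.setdefault_of_contains d PySem.Set.empty hc
    have hval : ∀ qv ∈ d.items, qv.1 = p → qv.2 = d.getD p PySem.Set.empty := by
      intro qv hqv hqp
      have : (p, qv.2) ∈ d.items := by rwa [← hqp]
      exact (PySem.Dict.getD_of_mem_items d this hd PySem.Set.empty).symm
    set w := d.getD p PySem.Set.empty with hw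
    set v := PySem.Set.diff w vs with hv
    have hins : (d.insert p v).items = d.items.map (fun q => if q.1 == p then (p, v) else q) :=
      PySem.Dict.items_insert_of_contains d v hc
    simp only [pvStepA, hset, ← hw, ← hv]
    by_cases hve : v.isEmpty = true
    · rw [if_pos hve]
      show ((d.insert p v).erase p).items = _
      simp only [PySem.Dict.erase, hins]
      rw [List.filter_map]
      rw [← List.filterMap_eq_map, List.filterMap_filter]
      apply List.filterMap_congr
      intro qv hqv
      by_cases hqp : qv.1 = p
      · have h2 : qv.2 = w := hval qv hqv hqp
        simp [hqp, h2, ← hv, hve]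
      · simp [hqp]
    · rw [if_neg hve]
      show (d.insert p v).items = _
      rw [hins, ← List.filterMap_eq_map]
      apply List.filterMap_congr
      intro qv hqv
      by_cases hqp : qv.1 = p
      · have h2 : qv.2 = w := hval qv hqv hqp
        simp [hqp, h2, ← hv, hve]
      · simp [hqp]
  · -- package absent: setdefault appends, subtraction leaves empty, pop undoes it
    have hc' : d.contains p = false := by simpa using hc
    have hkeys : ∀ qv ∈ d.items, (qv.1 = p) = False := by
      intro qv hqv
      simp only [eq_iff_iff, iff_false]
      intro hqp
      have : d.contains p = true := by
        simp only [PySem.Dict.contains, List.any_eq_true]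
        exact ⟨qv, hqv, by simp [hqp]⟩
      rw [this] at hc'; exact absurd hc' (by simp)
    have hset : d.setdefault p PySem.Set.empty = d.insert p PySem.Set.empty :=
      PySem.Dict.setdefault_of_not_contains d PySem.Set.empty hc'
    have hgd : (d.insert p PySem.Set.empty).getD p PySem.Set.empty = PySem.Set.empty := by
      simp [PySem.Dict.getD_insert_self]
    simp only [pvStepA, hset, hgd]
    have hdiff : PySem.Set.diff PySem.Set.empty vs = ([] : List String) := rfl
    rw [hdiff]
    rw [if_pos (by rfl)]
    rw [PySem.Dict.insert_insert_self]
    show ((d.insert p ([] : List String)).erase p).items = _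
    simp only [PySem.Dict.erase, PySem.Dict.items_insert_of_not_contains d ([] : List String) hc']
    rw [List.filter_append]
    have h1 : (d.items.filter (fun q => !(q.1 == p))) = d.items := by
      apply List.filter_eq_self.mpr
      intro qv hqv
      simp [hkeys qv hqv]
    have h2 : (([(p, ([] : List String))]).filter (fun q => !(q.1 == p))) = [] := by simp
    rw [h1, h2, List.append_nil]
    symm
    rw [List.filterMap_congr (g := fun qv => some qv) ?_, List.filterMap_some]
    intro qv hqv
    simp [hkeys qv hqv]

theorem pv_filterMap_keys_sublist (l : List (String × List String)) (p : String) (vs : List String) :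
    ((l.filterMap (fun qv =>
      if qv.1 = p then
        (if (PySem.Set.diff qv.2 vs).isEmpty then none else some (p, PySem.Set.diff qv.2 vs))
      else some qv)).map Prod.fst).Sublist (l.map Prod.fst) := by
  induction l with
  | nil => simp
  | cons qv t ih =>
    obtain ⟨q, w⟩ := qv
    by_cases hqp : q = p
    · subst hqp
      by_cases hve : PySem.Set.diff w vs = []
      · simpa [List.filterMap_cons, hve] using ih.cons _
      · simpa [List.filterMap_cons, hve] using ih.cons₂ q
    · simpa [List.filterMap_cons, hqp] using ih.cons₂ q

theorem pv_stepA_keys_nodup (d : PySem.Dict String (List String)) (hd : d.keys.Nodup)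
    (pv : String × List String) : (pvStepA d pv).keys.Nodup := by
  obtain ⟨p, vs⟩ := pv
  have hsub : ((pvStepA d (p, vs)).items.map Prod.fst).Sublist (d.items.map Prod.fst) := by
    rw [pv_stepA_items d hd p vs]
    exact pv_filterMap_keys_sublist d.items p vs
  exact List.Nodup.sublist hsub hd

theorem pv_loop2 (tr : List (String × List String)) (d : PySem.Dict String (List String))
    (htr : (tr.map Prod.fst).Nodup) (hd : d.keys.Nodup) :
    (tr.foldl pvStepA d).items = d.items.filterMap (pvStepB tr) := by
  induction tr generalizing d with
  | nil =>
    simp only [List.foldl_nil]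
    symm
    rw [List.filterMap_congr (g := some) ?_, List.filterMap_some]
    intro qv _
    simp [pvStepB, PySem.Dict.get?]
  | cons pv rest ih =>
    obtain ⟨p, vs⟩ := pv
    have hnp : p ∉ rest.map Prod.fst := by
      have := htr
      simp only [List.map_cons, List.nodup_cons] at this
      exact this.1
    have hrest : (rest.map Prod.fst).Nodup := by
      have := htr
      simp only [List.map_cons, List.nodup_cons] at this
      exact this.2
    have hget : (PySem.Dict.mk rest).get? p = none := by
      rw [PySem.Dict.get?_eq_none_iff_not_mem_keys]
      simpa using hnp
    rw [List.foldl_cons, ih _ hrest (pv_stepA_keys_nodup d hd (p, vs)),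
      pv_stepA_items d hd p vs, List.filterMap_filterMap]
    apply List.filterMap_congr
    intro qv _
    by_cases hqp : qv.1 = p
    · simp only [hqp, if_pos]
      by_cases hve : (PySem.Set.diff qv.2 vs).isEmpty = true
      · simp [pvStepB, hve, PySem.Dict.get?_mk_cons, hqp]
      · simp [pvStepB, hve, PySem.Dict.get?_mk_cons, hqp, hget]
    · have hbp : (p == qv.1) = false := by
        simp only [beq_eq_false_iff_ne, ne_eq]
        exact fun h => hqp h.symm
      simp [pvStepB, if_neg hqp, PySem.Dict.get?_mk_cons, hbp]

-- ===== VERDICT (by name: the statement is the Claim_ definition above) =====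
theorem pv_build (l : List (String × List String)) (d : PySem.Dict String (List String))
    (h : ∀ pv ∈ l, d.contains pv.1 = false) (hn : (l.map Prod.fst).Nodup) :
    (l.foldl (fun d pv => d.insert pv.1 (PySem.Set.ofList pv.2)) d).items
      = d.items ++ l.map (fun pv => (pv.1, PySem.Set.ofList pv.2)) := by
  induction l generalizing d with
  | nil => simp
  | cons pv t ih =>
    simp only [List.map_cons, List.nodup_cons] at hn
    rw [List.foldl_cons, ih]
    · rw [PySem.Dict.items_insert_of_not_contains d (PySem.Set.ofList pv.2) (h pv (by simp))]
      simp
    · intro qv hqv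
      rw [PySem.Dict.contains_insert]
      have h1 : (qv.1 == pv.1) = false := by
        simp only [beq_eq_false_iff_ne, ne_eq]
        intro he
        exact hn.1 (he ▸ List.mem_map_of_mem hqv)
      rw [h1, h qv (by simp [hqv])]
      rfl
    · exact hn.2

theorem remove_multiversion_py_spec : Claim_equal_remove_multiversion_py := by
  intro left tr _hdom hpre
  obtain ⟨hl, htr, hvals⟩ := hpre
  unfold Spec_remove_multiversion_py
  show (tr.foldl pvStepA
      (left.foldl (fun d pv => d.insert pv.1 (PySem.Set.ofList pv.2)) PySem.Dict.empty)).items = _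
  set d0 := left.foldl (fun d pv => d.insert pv.1 (PySem.Set.ofList pv.2)) PySem.Dict.empty with hd0
  have h0 : d0.items = left.map (fun pv => (pv.1, PySem.Set.ofList pv.2)) := by
    rw [hd0, pv_build left PySem.Dict.empty (fun pv _ => rfl) hl]
    rfl
  have h0k : d0.keys.Nodup := by
    show (d0.items.map Prod.fst).Nodup
    rw [h0, List.map_map]
    simpa using hl
  rw [pv_loop2 tr d0 htr h0k, h0, List.filterMap_map]
  show _ = List.filterMap _ left
  apply List.filterMap_congr
  intro pv hpv
  have hof : PySem.Set.ofList pv.2 = pv.2 := pv_ofList_eq_self pv.2 (hvals pv hpv)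
  cases hget : (PySem.Dict.mk tr).get? pv.1 with
  | none => simp [pvStepB, Function.comp, hget]
  | some rs => simp [pvStepB, Function.comp, hget, hof]
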